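-- pv_equiv track=rewrite | github.com/azure-wings/boj-solutions | 백준/Bronze/8958. OX퀴즈/OX퀴즈.py | sol_8958
-- ===== SOURCE A (Python) =====
-- def sol_8958(s: str) -> int:
--     score, acc = 0, 0
--     for c in s:
--         match c:
--             case 'O':
--                 acc += 1
--                 score += acc
--             case 'X':
--                 acc = 0
--     return score
-- ===== SOURCE B (Python) =====
-- def sol_8958(s: str) -> int:
--     total = 0
--     for seg in s.split('X'):
--         c = seg.count('O')
--         total += c * (c + 1) // 2
--     return total
-- ===== Notes on version B (the rewrite author's own statement) =====
-- stated objective: alternative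
-- what changed: B splits the string on the separator character, counts the 'O's in each segment, and adds the triangular-number closed form c*(c+1)//2 per segment, replacing A's character-by-character accumulator that increments and resets a running streak.
import Mathlib
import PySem

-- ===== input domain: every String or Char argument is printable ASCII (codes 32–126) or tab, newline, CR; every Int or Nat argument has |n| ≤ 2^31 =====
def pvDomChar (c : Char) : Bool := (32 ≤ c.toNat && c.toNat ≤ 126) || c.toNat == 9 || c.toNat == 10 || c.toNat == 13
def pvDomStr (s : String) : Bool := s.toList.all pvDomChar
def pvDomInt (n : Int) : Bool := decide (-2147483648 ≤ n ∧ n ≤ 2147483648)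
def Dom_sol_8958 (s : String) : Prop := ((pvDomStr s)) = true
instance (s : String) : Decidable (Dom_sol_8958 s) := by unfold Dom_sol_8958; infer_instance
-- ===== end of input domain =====

-- B recomputes A's streak-accumulator score per 'X'-delimited segment with the triangular closed form; a different decomposition of the same O(n) task.

-- ===== PORT A =====
-- state (score, acc); match c: 'O' → acc += 1; score += acc; 'X' → acc = 0; else nothing
def sol_8958 (s : String) : Int :=
  (s.toList.foldl
    (fun (st : Int × Int) (c : Char) =>
      if c = 'O' then (st.1 + (st.2 + 1), st.2 + 1)
      else if c = 'X' then (st.1, 0)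
      else st)
    (0, 0)).1

-- ===== PORT B =====
-- for seg in s.split('X'): total += seg.count('O') * (seg.count('O') + 1) // 2
def sol_8958_alt (s : String) : Int :=
  (PySem.Chars.splitOn s.toList ['X']).foldl
    (fun (total : Int) (seg : List Char) =>
      let c : Int := (PySem.Chars.count seg ['O'] : Int)
      total + PySem.Int.floordiv (c * (c + 1)) 2)
    0

-- ===== PRECONDITION & SPEC =====
def Spec_sol_8958 (s : String) (out : Int) : Prop := out = sol_8958_alt s
instance (s : String) (out : Int) : Decidable (Spec_sol_8958 s out) := by unfold Spec_sol_8958; infer_instance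

-- ===== CLAIM (what is proved, stated in full; the proofs are below) =====
def Claim_equal_sol_8958 : Prop := ∀ (s : String), Dom_sol_8958 s → Spec_sol_8958 s (sol_8958 s)

-- ===== LEMMAS AND PROOFS =====

-- A's score as a structural recursion carrying only the streak value
def pvG : List Char → Int → Int
  | [], _ => 0
  | c :: rest, a =>
    if c = 'O' then (a + 1) + pvG rest (a + 1)
    else if c = 'X' then pvG rest 0
    else pvG rest a

theorem pvG_foldl (l : List Char) (score acc : Int) :
    (l.foldl
      (fun (st : Int × Int) (c : Char) =>
        if c = 'O' then (st.1 + (st.2 + 1), st.2 + 1)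
        else if c = 'X' then (st.1, 0)
        else st)
      (score, acc)).1 = score + pvG l acc := by
  induction l generalizing score acc with
  | nil => simp [pvG]
  | cons c rest ih =>
    by_cases hO : c = 'O'
    · simp [pvG, hO, ih]; ring
    · by_cases hX : c = 'X'
      · simp [pvG, hO, hX, ih]
      · simp [pvG, hO, hX, ih]

-- splitOn with separator ['X'] as a simple structural recursion
def pvSplit : List Char → List Char → List (List Char)
  | [], cur => [cur.reverse]
  | c :: rest, cur =>
    if c = 'X' then cur.reverse :: pvSplit rest []
    else pvSplit rest (c :: cur)

theorem pvSplit_go (l : List Char) (fuel : Nat) (cur : List Char)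
    (acc : List (List Char)) (h : l.length < fuel) :
    PySem.Chars.splitOn.go ['X'] fuel l cur acc = acc.reverse ++ pvSplit l cur := by
  induction l generalizing fuel cur acc with
  | nil =>
    cases fuel with
    | zero => omega
    | succ n => simp [PySem.Chars.splitOn.go, pvSplit]
  | cons c rest ih =>
    cases fuel with
    | zero => omega
    | succ n =>
      by_cases hX : c = 'X'
      · rw [show PySem.Chars.splitOn.go ['X'] (n+1) (c :: rest) cur acc
            = PySem.Chars.splitOn.go ['X'] n rest [] (cur.reverse :: acc) by
              simp [PySem.Chars.splitOn.go, hX, List.isPrefixOf],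
          ih n [] (cur.reverse :: acc) (by simpa using Nat.lt_of_succ_lt_succ h)]
        simp [pvSplit, hX]
      · have hne : ('X' == c) = false := by simpa [beq_iff_eq] using (Ne.symm hX)
        simp [PySem.Chars.splitOn.go, pvSplit, hX, List.isPrefixOf, hne,
          ih n (c :: cur) acc (Nat.lt_of_succ_lt_succ h)]

theorem pvSplit_splitOn (l : List Char) :
    PySem.Chars.splitOn l ['X'] = pvSplit l [] := by
  simpa using pvSplit_go l (l.length + 1) [] [] (by omega)

-- Chars.count with a one-character pattern is List.count
theorem pvCount_go (l : List Char) (fuel : Nat) (acc : Nat) (h : l.length ≤ fuel) :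
    PySem.Chars.count.go ['O'] fuel l acc = acc + l.count 'O' := by
  induction l generalizing fuel acc with
  | nil =>
    cases fuel with
    | zero => simp [PySem.Chars.count.go]
    | succ n => simp [PySem.Chars.count.go]
  | cons c rest ih =>
    cases fuel with
    | zero => simp at h
    | succ n =>
      by_cases hO : c = 'O'
      · simp [PySem.Chars.count.go, List.isPrefixOf, hO,
          ih n (acc + 1) (by simpa using Nat.le_of_succ_le_succ h)]
        omega
      · have hne : ('O' == c) = false := by simpa [beq_iff_eq] using (Ne.symm hO)
        simp [PySem.Chars.count.go, List.isPrefixOf, hne, hO,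
          ih n acc (Nat.le_of_succ_le_succ h)]

theorem pvCount_eq (l : List Char) :
    PySem.Chars.count l ['O'] = l.count 'O' := by
  simp [PySem.Chars.count]
  simpa using pvCount_go l l.length 0 (le_refl _)

-- the triangular closed form, and its step
def pvTri (n : Int) : Int := PySem.Int.floordiv (n * (n + 1)) 2

theorem pvTri_succ (a : Int) : pvTri (a + 1) = pvTri a + (a + 1) := by
  unfold pvTri
  rw [PySem.Int.floordiv_eq_ediv_of_pos (by omega), PySem.Int.floordiv_eq_ediv_of_pos (by omega)]
  have h : (a + 1) * (a + 1 + 1) = a * (a + 1) + (a + 1) * 2 := by ring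
  rw [h, Int.add_mul_ediv_right _ _ (by omega)]

theorem pvTri_zero : pvTri 0 = 0 := by decide

-- main invariant: A's streak recursion versus segment-wise triangular sums
theorem pvMain (l cur : List Char) :
    pvG l ((cur.count 'O' : Int)) =
      ((pvSplit l cur).map (fun seg => pvTri ((seg.count 'O' : Int)))).sum
        - pvTri ((cur.count 'O' : Int)) := by
  induction l generalizing cur with
  | nil => simp [pvG, pvSplit]
  | cons c rest ih =>
    by_cases hO : c = 'O'
    · have h1 : ((('O' :: cur).count 'O' : Int)) = (cur.count 'O' : Int) + 1 := by
        simp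
      have := ih ('O' :: cur)
      rw [h1] at this
      simp only [pvG, pvSplit, hO, if_true, if_neg (by decide : ¬ ('O' = 'X'))]
      rw [this, pvTri_succ]
      ring
    · by_cases hX : c = 'X'
      · have := ih ([] : List Char)
        simp only [List.count_nil, Nat.cast_zero] at this
        simp only [pvG, pvSplit, hX, if_true]
        rw [this, pvTri_zero]
        simp
      · have h1 : (((c :: cur).count 'O' : Int)) = (cur.count 'O' : Int) := by
          simp [hO]
        have := ih (c :: cur)
        rw [h1] at this
        simp only [pvG, pvSplit, hO, hX, if_false]
        rw [this]

-- ===== VERDICT (by name: the statement is the Claim_ definition above) =====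
theorem sol_8958_spec : Claim_equal_sol_8958 := by
  intro s _
  unfold Spec_sol_8958 sol_8958 sol_8958_alt
  rw [pvG_foldl, pvSplit_splitOn]
  have hfold :
      (pvSplit s.toList []).foldl
        (fun (total : Int) (seg : List Char) =>
          total + PySem.Int.floordiv (((PySem.Chars.count seg ['O'] : Int)) *
            ((PySem.Chars.count seg ['O'] : Int) + 1)) 2) 0
        = ((pvSplit s.toList []).map
            (fun seg => pvTri ((seg.count 'O' : Int)))).sum := by
    rw [PySem.List.foldl_add]
    simp [pvTri, pvCount_eq]
  have := pvMain s.toList []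
  simp only [List.count_nil, Nat.cast_zero, pvTri_zero, sub_zero] at this
  rw [this]
  simpa using hfold.symm
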